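-- pv_equiv track=rewrite | github.com/jnqpblc/Misc-Python | weak-password-gen.py | has_three_of_four_groups
-- ===== SOURCE A (Python) =====
-- import string
--
-- def has_three_of_four_groups(password):
--     groups = {
--         "uppercase": any(c.isupper() for c in password),
--         "lowercase": any(c.islower() for c in password),
--         "number": any(c.isdigit() for c in password),
--         "symbol": any(c in string.punctuation for c in password),
--     }
--     # Count how many groups are present
--     return sum(groups.values()) >= 3
-- ===== SOURCE B (Python) =====
-- import string
--
-- # Character -> group bit, built once: uppercase=1, lowercase=2, digit=4, symbol=8.
-- _BIT = {}
-- for _c in string.ascii_uppercase: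
--     _BIT[_c] = 1
-- for _c in string.ascii_lowercase:
--     _BIT[_c] = 2
-- for _c in string.digits:
--     _BIT[_c] = 4
-- for _c in string.punctuation:
--     _BIT[_c] = 8
--
-- def has_three_of_four_groups(password):
--     mask = 0
--     for c in password:
--         mask |= _BIT.get(c, 0)
--     return bin(mask).count("1") >= 3
-- ===== Notes on version B (the rewrite author's own statement) =====
-- stated objective: faster
-- what changed: Replaces four any()-predicate scans summed from a dict of booleans with a precomputed char-to-group-bit lookup table, a single pass OR-ing bits into an integer mask, and a popcount(mask) >= 3 test.
import Mathlib
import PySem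

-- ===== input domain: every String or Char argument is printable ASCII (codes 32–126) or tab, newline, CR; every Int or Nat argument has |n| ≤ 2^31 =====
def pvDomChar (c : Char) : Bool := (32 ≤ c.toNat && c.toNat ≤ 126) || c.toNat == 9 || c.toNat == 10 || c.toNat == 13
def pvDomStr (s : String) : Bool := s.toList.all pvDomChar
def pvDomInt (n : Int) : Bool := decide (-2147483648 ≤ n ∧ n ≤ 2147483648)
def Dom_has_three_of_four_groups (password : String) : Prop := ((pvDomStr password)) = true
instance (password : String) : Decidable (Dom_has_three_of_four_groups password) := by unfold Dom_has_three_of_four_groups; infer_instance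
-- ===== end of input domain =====

-- B replaces A's four any()-scans summed from a dict by a precomputed char->bit
-- table: one pass OR-ing group bits into a mask, then popcount(mask) >= 3.


-- string.punctuation: exactly CPython's 32 characters
def pyPunctuation : List Char := "!\"#$%&'()*+,-./:;<=>?@[\\]^_`{|}~".toList
-- string.ascii_uppercase / ascii_lowercase / digits
def pyAsciiUppercase : List Char := "ABCDEFGHIJKLMNOPQRSTUVWXYZ".toList
def pyAsciiLowercase : List Char := "abcdefghijklmnopqrstuvwxyz".toList
def pyDigits : List Char := "0123456789".toList

-- ===== PORT A =====
def has_three_of_four_groups (password : String) : Bool :=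
  -- the dict's four values, in insertion order
  let uppercase := password.toList.any PySem.Chars.isupper
  let lowercase := password.toList.any PySem.Chars.islower
  let number   := password.toList.any PySem.Chars.isdigit
  let symbol   := password.toList.any (fun c => pyPunctuation.contains c)
  -- sum(groups.values()) >= 3  (booleans sum as 0/1)
  ((if uppercase then 1 else 0) + (if lowercase then 1 else 0) +
   (if number then 1 else 0) + (if symbol then 1 else 0) : Int) ≥ 3

-- ===== PORT B =====
-- the module-level table _BIT: four loops of dict inserts
def pvBIT : PySem.Dict Char Int :=
  let d := pyAsciiUppercase.foldl (fun d c => d.insert c 1) PySem.Dict.empty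
  let d := pyAsciiLowercase.foldl (fun d c => d.insert c 2) d
  let d := pyDigits.foldl (fun d c => d.insert c 4) d
  pyPunctuation.foldl (fun d c => d.insert c 8) d

-- mask |= _BIT.get(c, 0); return bin(mask).count("1") >= 3
def has_three_of_four_groups_alt (password : String) : Bool :=
  let mask := password.toList.foldl (fun m c => PySem.Int.bor m (pvBIT.getD c 0)) 0
  (PySem.Str.count (PySem.Int.pyBin mask) "1" : Int) ≥ 3

-- ===== PRECONDITION & SPEC =====
def Spec_has_three_of_four_groups (password : String) (out : Bool) : Prop := out = has_three_of_four_groups_alt password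
instance (password : String) (out : Bool) : Decidable (Spec_has_three_of_four_groups password out) := by unfold Spec_has_three_of_four_groups; infer_instance

-- ===== CLAIM (what is proved, stated in full; the proofs are below) =====
def Claim_equal_has_three_of_four_groups : Prop := ∀ (password : String), Dom_has_three_of_four_groups password → Spec_has_three_of_four_groups password (has_three_of_four_groups password)

-- ===== LEMMAS AND PROOFS =====

-- the 4-bit mask encoding four group flags
def pvEnc (u l d s : Bool) : Int :=
  (if u then 1 else 0) + (if l then 2 else 0) + (if d then 4 else 0) + (if s then 8 else 0)

-- on every domain character, the table lookup is the encoding of A's four tests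
set_option maxRecDepth 8192 in
lemma bit_eq_enc (c : Char) (h : pvDomChar c = true) :
    pvBIT.getD c 0
      = pvEnc (PySem.Chars.isupper c) (PySem.Chars.islower c)
              (PySem.Chars.isdigit c) (pyPunctuation.contains c) := by
  have hlt : c.toNat < 127 := by
    simp [pvDomChar] at h; omega
  have hall : ∀ n ∈ List.range 127,
      (pvBIT.getD (Char.ofNat n) 0
        = pvEnc (PySem.Chars.isupper (Char.ofNat n)) (PySem.Chars.islower (Char.ofNat n))
                (PySem.Chars.isdigit (Char.ofNat n)) (pyPunctuation.contains (Char.ofNat n))) := by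
    decide
  have := hall c.toNat (List.mem_range.mpr hlt)
  simpa [Char.ofNat_toNat] using this

-- OR of two encoded masks encodes the OR of the flags
lemma bor_enc (u l d s u' l' d' s' : Bool) :
    PySem.Int.bor (pvEnc u l d s) (pvEnc u' l' d' s')
      = pvEnc (u || u') (l || l') (d || d') (s || s') := by
  cases u <;> cases l <;> cases d <;> cases s <;>
    cases u' <;> cases l' <;> cases d' <;> cases s' <;> decide

-- the fold's invariant over any domain suffix
lemma mask_fold (cs : List Char) (h : cs.all pvDomChar = true) (u l d s : Bool) :
    cs.foldl (fun m c => PySem.Int.bor m (pvBIT.getD c 0)) (pvEnc u l d s)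
    = pvEnc (u || cs.any PySem.Chars.isupper) (l || cs.any PySem.Chars.islower)
            (d || cs.any PySem.Chars.isdigit) (s || cs.any (fun c => pyPunctuation.contains c)) := by
  induction cs generalizing u l d s with
  | nil => simp
  | cons c cs ih =>
    simp only [List.all_cons, Bool.and_eq_true] at h
    rw [List.foldl_cons, bit_eq_enc c h.1, bor_enc, ih h.2]
    simp [Bool.or_assoc]

-- for each of the 16 masks, B's popcount test agrees with A's sum test
lemma final_eq (u l d s : Bool) :
    (((if u then 1 else 0) + (if l then 1 else 0) +
      (if d then 1 else 0) + (if s then 1 else 0) : Int) ≥ 3 : Bool)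
    = ((PySem.Str.count (PySem.Int.pyBin (pvEnc u l d s)) "1" : Int) ≥ 3 : Bool) := by
  cases u <;> cases l <;> cases d <;> cases s <;> decide

-- the fold from mask 0
lemma mask_fold0 (cs : List Char) (h : cs.all pvDomChar = true) :
    cs.foldl (fun m c => PySem.Int.bor m (pvBIT.getD c 0)) 0
    = pvEnc (cs.any PySem.Chars.isupper) (cs.any PySem.Chars.islower)
            (cs.any PySem.Chars.isdigit) (cs.any (fun c => pyPunctuation.contains c)) := by
  simpa using mask_fold cs h false false false false

-- ===== VERDICT (by name: the statement is the Claim_ definition above) =====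
theorem has_three_of_four_groups_spec : Claim_equal_has_three_of_four_groups := by
  intro password hdom
  have h : password.toList.all pvDomChar = true := hdom
  unfold Spec_has_three_of_four_groups has_three_of_four_groups has_three_of_four_groups_alt
  simp only [mask_fold0 password.toList h]
  exact final_eq _ _ _ _
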